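-- pv_equiv track=rewrite | github.com/otdavies/Rapid | file_parser.py | _deduplicate_functions
-- ===== SOURCE A (Python) =====
-- from typing import List, Dict, Any, Optional, Tuple
--
-- def _deduplicate_functions(functions: List[Dict[str, Any]]) -> List[Dict[str, Any]]:
--     if not functions:
--         return []
--     function_groups = {}
--     for func in functions:
--         name = func["name"]
--         if name not in function_groups:
--             function_groups[name] = []
--         function_groups[name].append(func)
--     deduplicated = []
--     for name, group in function_groups.items():
--         if len(group) == 1:
--             deduplicated.append(group[0])
--         else:
--             base_func = group[0].copy()
--             signatures = list(dict.fromkeys(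
--                 [f["signature"] for f in group]))
--             if len(signatures) > 1:
--                 base_func["signature"] = " | ".join(signatures[:3])
--                 if len(signatures) > 3:
--                     base_func["signature"] += f" (and {len(signatures) - 3} more overloads)"
--             descriptions = list(dict.fromkeys(
--                 [f.get("description") for f in group if f.get("description")]))
--             if descriptions:
--                 base_func["description"] = " | ".join(descriptions[:2])
--             deduplicated.append(base_func)
--     return deduplicated
-- ===== SOURCE B (Python) =====
-- from typing import List, Dict, Any
--
-- def _deduplicate_functions(functions: List[Dict[str, Any]]) -> List[Dict[str, Any]]:
--     # Single streaming pass: name -> [base_func, sigs_or_None, descs_or_None].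
--     # sigs/descs stay None while the name was seen once; on a repeat they are
--     # seeded from the base and extended with order-preserving dedup.
--     groups: Dict[str, list] = {}
--     for func in functions:
--         name = func["name"]
--         g = groups.get(name)
--         if g is None:
--             groups[name] = [func, None, None]
--             continue
--         if g[1] is None:
--             g[1] = [g[0]["signature"]]
--             g[2] = []
--             d0 = g[0].get("description")
--             if d0:
--                 g[2].append(d0)
--         s = func["signature"]
--         if s not in g[1]:
--             g[1].append(s)
--         d = func.get("description")
--         if d and d not in g[2]:
--             g[2].append(d)
--     result = []
--     for base, sigs, descs in groups.values():
--         if sigs is None: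
--             result.append(base)
--             continue
--         merged = base.copy()
--         if len(sigs) > 1:
--             s = " | ".join(sigs[:3])
--             if len(sigs) > 3:
--                 s += f" (and {len(sigs) - 3} more overloads)"
--             merged["signature"] = s
--         if descs:
--             merged["description"] = " | ".join(descs[:2])
--         result.append(merged)
--     return result
-- ===== Notes on version B (the rewrite author's own statement) =====
-- stated objective: alternative
-- what changed: Instead of A's two-phase group-then-postprocess (build full per-name lists, then re-scan each group with dict.fromkeys to dedup signatures/descriptions), B does one streaming pass that maintains per name the base func plus incrementally deduplicated signature/description lists, emitting the merge directly from that state.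
import Mathlib
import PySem

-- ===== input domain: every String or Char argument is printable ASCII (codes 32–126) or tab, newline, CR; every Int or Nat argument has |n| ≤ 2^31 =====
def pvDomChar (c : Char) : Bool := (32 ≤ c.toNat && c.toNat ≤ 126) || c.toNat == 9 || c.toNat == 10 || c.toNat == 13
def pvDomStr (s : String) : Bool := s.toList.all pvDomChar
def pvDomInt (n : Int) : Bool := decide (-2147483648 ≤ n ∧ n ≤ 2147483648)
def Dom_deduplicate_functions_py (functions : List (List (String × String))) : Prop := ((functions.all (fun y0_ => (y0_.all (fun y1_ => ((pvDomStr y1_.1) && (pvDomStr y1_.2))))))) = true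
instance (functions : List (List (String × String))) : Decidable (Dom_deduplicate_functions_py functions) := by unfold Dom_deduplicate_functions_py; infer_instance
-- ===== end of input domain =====

-- B is a single streaming pass (one dict of per-name merge state) instead of A's group-then-reprocess; same return value, no speed claim.

-- shared dict-access helpers (both Pythons do func[k] / func.get("description") on the same dicts)
-- func[k]; Python raises KeyError when k is absent — those inputs are excluded by Pre_
def pvItem (f : List (String × String)) (k : String) : String := (PySem.Dict.mk f).getD k ""
-- func.get("description") when truthy (non-None, non-empty), else none
def pvGetTruthy? (f : List (String × String)) : Option String :=
  match (PySem.Dict.mk f).get? "description" with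
  | some d => if d = "" then none else some d
  | none => none

-- ===== PORT A =====
-- the body of A's second loop for one (name, group) item
def pvEmitA (group : List (List (String × String))) : List (String × String) :=
  if group.length == 1 then group.headD []
  else
    let base := PySem.Dict.mk (group.headD [])
    let signatures := PySem.List.dedup (group.map (fun f => pvItem f "signature"))
    let base :=
      if signatures.length > 1 then
        let s := PySem.Str.join " | " (PySem.List.slice signatures none (some 3))
        let s := if signatures.length > 3 then
            PySem.Str.join "" [s, " (and ", PySem.Int.toStr ((signatures.length : Int) - 3), " more overloads)"]
          else s
        base.insert "signature" s
      else base
    let descriptions := PySem.List.dedup (group.filterMap pvGetTruthy?)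
    let base :=
      if descriptions ≠ [] then
        base.insert "description" (PySem.Str.join " | " (PySem.List.slice descriptions none (some 2)))
      else base
    base.items

def deduplicate_functions_py (functions : List (List (String × String))) : List (List (String × String)) :=
  if functions = [] then []
  else
    let function_groups := functions.foldl
      (fun d func =>
        let name := pvItem func "name"
        let d := if d.contains name then d else d.insert name ([] : List (List (String × String)))
        d.insert name (d.getD name [] ++ [func]))
      PySem.Dict.empty
    function_groups.items.foldl (fun acc p => acc ++ [pvEmitA p.2]) []

-- ===== PORT B =====
-- per-name streaming state: (base func, none while seen once | some (deduped sigs, deduped truthy descs))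
def pvStepB (d : PySem.Dict String ((List (String × String)) × Option (List String × List String)))
    (func : List (String × String)) :
    PySem.Dict String ((List (String × String)) × Option (List String × List String)) :=
  let name := pvItem func "name"
  d.insert name
    (match d.get? name with
     | none => (func, none)
     | some (b, o) =>
       let sd :=
         match o with
         | some sd => sd
         | none =>
           ([pvItem b "signature"],
            match pvGetTruthy? b with
            | some d0 => [d0]
            | none => [])
       let sigs := PySem.Set.add sd.1 (pvItem func "signature")
       let descs :=
         match pvGetTruthy? func with
         | some dd => PySem.Set.add sd.2 dd
         | none => sd.2
       (b, some (sigs, descs)))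

-- emit one merge state
def pvEmitB (g : (List (String × String)) × Option (List String × List String)) : List (String × String) :=
  match g.2 with
  | none => g.1
  | some (sigs, descs) =>
    let merged := PySem.Dict.mk g.1
    let merged :=
      if sigs.length > 1 then
        let s := PySem.Str.join " | " (PySem.List.slice sigs none (some 3))
        let s := if sigs.length > 3 then
            PySem.Str.join "" [s, " (and ", PySem.Int.toStr ((sigs.length : Int) - 3), " more overloads)"]
          else s
        merged.insert "signature" s
      else merged
    let merged :=
      if descs ≠ [] then
        merged.insert "description" (PySem.Str.join " | " (PySem.List.slice descs none (some 2)))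
      else merged
    merged.items

def deduplicate_functions_py_alt (functions : List (List (String × String))) : List (List (String × String)) :=
  let groups := functions.foldl pvStepB PySem.Dict.empty
  groups.values.foldl (fun acc g => acc ++ [pvEmitB g]) []

-- ===== PRECONDITION & SPEC =====
-- Pre_ excludes exactly the KeyError inputs: a func without a "name" key, or a func sharing its
-- name with another func but lacking a "signature" key (A reads f["signature"] only in merged groups).
def Pre_deduplicate_functions_py (functions : List (List (String × String))) : Prop :=
  ∀ f ∈ functions,
    (PySem.Dict.mk f).contains "name" = true ∧
    (2 ≤ functions.countP (fun g => pvItem g "name" == pvItem f "name") →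
      (PySem.Dict.mk f).contains "signature" = true)
instance (functions : List (List (String × String))) : Decidable (Pre_deduplicate_functions_py functions) := by
  unfold Pre_deduplicate_functions_py; infer_instance
def pvWitness_deduplicate_functions_py : (List (List (String × String))) :=
  [[("name", "f"), ("signature", "f(x)")],
   [("name", "f"), ("signature", "f(x, y)"), ("description", "doc")],
   [("name", "g"), ("description", "solo")]]
def Spec_deduplicate_functions_py (functions : List (List (String × String))) (out : List (List (String × String))) : Prop := out = deduplicate_functions_py_alt functions
instance (functions : List (List (String × String))) (out : List (List (String × String))) : Decidable (Spec_deduplicate_functions_py functions out) := by unfold Spec_deduplicate_functions_py; infer_instance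

-- ===== CLAIM (what is proved, stated in full; the proofs are below) =====
def Claim_equal_deduplicate_functions_py : Prop := ∀ (functions : List (List (String × String))), Dom_deduplicate_functions_py functions → Pre_deduplicate_functions_py functions → Spec_deduplicate_functions_py functions (deduplicate_functions_py functions)

-- ===== LEMMAS AND PROOFS =====

-- the name key of a func
def pvName (f : List (String × String)) : String := pvItem f "name"

-- A's grouping step, written as a single dict.modify
theorem pvStepA_eq :
    (fun (d : PySem.Dict String (List (List (String × String)))) func =>
        let name := pvItem func "name"
        let d := if d.contains name then d else d.insert name ([] : List (List (String × String)))
        d.insert name (d.getD name [] ++ [func]))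
      = fun d func => d.modify (pvName func) [] (· ++ [func]) := by
  funext d func
  simp only [pvName]
  by_cases h : d.contains (pvItem func "name")
  · simp [h, PySem.Dict.modify]
  · simp only [Bool.not_eq_true] at h
    simp [h, PySem.Dict.modify, PySem.Dict.getD_insert_self, PySem.Dict.insert_insert_self,
      PySem.Dict.getD_of_not_contains _ _ h]

-- A's groups dict: lookup is the per-name filter
theorem pvA_getD (functions : List (List (String × String))) (n : String) :
    ((functions.foldl (fun d func => d.modify (pvName func) [] (· ++ [func])) PySem.Dict.empty).getD n [])
      = functions.filter (fun f => pvName f == n) := by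
  have h1 : functions.foldl (fun d func => d.modify (pvName func) [] (· ++ [func])) PySem.Dict.empty
      = (functions.map (fun f => (pvName f, f))).foldl
          (fun d p => d.modify p.1 [] (· ++ [p.2])) PySem.Dict.empty := by
    rw [List.foldl_map]
  rw [h1, PySem.Dict.getD_foldl_modify_append]
  simp [List.filter_map, Function.comp_def, PySem.Dict.getD_empty]

-- B's update on the per-name state, as a function of the old optional state
def pvUpd (o : Option ((List (String × String)) × Option (List String × List String)))
    (func : List (String × String)) :
    (List (String × String)) × Option (List String × List String) :=
  match o with
  | none => (func, none)
  | some (b, oo) =>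
    let sd :=
      match oo with
      | some sd => sd
      | none =>
        ([pvItem b "signature"],
         match pvGetTruthy? b with
         | some d0 => [d0]
         | none => [])
    let sigs := PySem.Set.add sd.1 (pvItem func "signature")
    let descs :=
      match pvGetTruthy? func with
      | some dd => PySem.Set.add sd.2 dd
      | none => sd.2
    (b, some (sigs, descs))

theorem pvStepB_eq : pvStepB = fun d func => d.insert (pvName func) (pvUpd (d.get? (pvName func)) func) := by
  rfl

-- B's fold, observed at one key
theorem pvB_get? (l : List (List (String × String)))
    (d : PySem.Dict String ((List (String × String)) × Option (List String × List String))) (n : String) :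
    (l.foldl pvStepB d).get? n
      = (l.filter (fun f => pvName f == n)).foldl (fun o f => some (pvUpd o f)) (d.get? n) := by
  induction l generalizing d with
  | nil => rfl
  | cons f l ih =>
    rw [List.foldl_cons,
      show pvStepB d f = d.insert (pvName f) (pvUpd (d.get? (pvName f)) f) from rfl, ih]
    by_cases h : pvName f = n
    · subst h
      simp
    · have hb : (pvName f == n) = false := by simp [h]
      simp [hb, PySem.Dict.get?_insert, Ne.symm h]

-- the merge state a group of funcs folds to
def pvPhi (g : List (List (String × String))) :
    (List (String × String)) × Option (List String × List String) :=
  (g.headD [],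
   if g.length ≤ 1 then none
   else some (PySem.Set.ofList (g.map (fun f => pvItem f "signature")),
              PySem.Set.ofList (g.filterMap pvGetTruthy?)))

-- the description-accumulating step of B, named
def pvDadd (t : List String) (f : List (String × String)) : List String :=
  match pvGetTruthy? f with
  | some dd => PySem.Set.add t dd
  | none => t

theorem pvFold_upd_some (l : List (List (String × String))) (b : List (String × String))
    (s t : List String) :
    l.foldl (fun o f => some (pvUpd o f)) (some (b, some (s, t)))
      = some (b, some (l.foldl (fun s f => PySem.Set.add s (pvItem f "signature")) s,
                       l.foldl pvDadd t)) := by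
  induction l generalizing s t with
  | nil => rfl
  | cons f l ih => simpa [pvUpd, pvDadd] using ih _ _

theorem pvDadd_foldl (l : List (List (String × String))) (t : List String) :
    (l.filterMap pvGetTruthy?).foldl PySem.Set.add t = l.foldl pvDadd t := by
  induction l generalizing t with
  | nil => rfl
  | cons f l ih =>
    cases h : pvGetTruthy? f <;> simp [h, pvDadd, ih]

theorem pvFold_upd (g : List (List (String × String))) (hne : g ≠ []) :
    g.foldl (fun o f => some (pvUpd o f)) none = some (pvPhi g) := by
  match g with
  | [g0] => simp [pvUpd, pvPhi]
  | g0 :: f :: rest =>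
    have h1 : (g0 :: f :: rest).foldl (fun o f => some (pvUpd o f)) none
        = rest.foldl (fun o f => some (pvUpd o f)) (some (pvUpd (some (g0, none)) f)) := rfl
    rw [h1]
    have h2 : pvUpd (some (g0, none)) f
        = (g0, some (PySem.Set.add [pvItem g0 "signature"] (pvItem f "signature"),
                     pvDadd (pvDadd [] g0) f)) := by
      simp [pvUpd, pvDadd, PySem.Set.add]
    rw [h2, pvFold_upd_some]
    have hs : rest.foldl (fun s f => PySem.Set.add s (pvItem f "signature"))
          (PySem.Set.add [pvItem g0 "signature"] (pvItem f "signature"))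
        = PySem.Set.ofList ((g0 :: f :: rest).map (fun f => pvItem f "signature")) := by
      rw [PySem.Set.ofList_eq_foldl, List.foldl_map]
      simp [PySem.Set.add]
    have ht : rest.foldl pvDadd (pvDadd (pvDadd [] g0) f)
        = PySem.Set.ofList ((g0 :: f :: rest).filterMap pvGetTruthy?) := by
      rw [PySem.Set.ofList_eq_foldl, pvDadd_foldl]
      rfl
    rw [hs, ht]
    simp [pvPhi]

theorem pvEmit_eq (g : List (List (String × String))) (hne : g ≠ []) :
    pvEmitA g = pvEmitB (pvPhi g) := by
  match g with
  | [g0] => simp [pvEmitA, pvEmitB, pvPhi]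
  | g0 :: f :: rest =>
    have hlen : ¬ (g0 :: f :: rest).length ≤ 1 := by simp
    have hbeq : ((g0 :: f :: rest).length == 1) = false := by simp
    simp only [pvEmitA, pvEmitB, pvPhi, hbeq, if_neg hlen, PySem.List.dedup_eq_ofList,
      Bool.false_eq_true, if_false, List.headD_cons]

-- A's whole result, as a map over the first-seen-order name list
theorem pvA_out (functions : List (List (String × String))) (hf : functions ≠ []) :
    deduplicate_functions_py functions
      = (PySem.Set.ofList (functions.map pvName)).map
          (fun n => pvEmitA (functions.filter (fun f => pvName f == n))) := by
  unfold deduplicate_functions_py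
  rw [if_neg hf, pvStepA_eq]
  have hnod : (functions.foldl (fun d func => d.modify (pvName func) [] (· ++ [func]))
      PySem.Dict.empty).keys.Nodup := by
    apply PySem.Dict.nodup_keys_foldl_modify_key
    simp
  have hkeys : (functions.foldl (fun d func => d.modify (pvName func) [] (· ++ [func]))
      PySem.Dict.empty).keys = PySem.Set.ofList (functions.map pvName) := by
    rw [PySem.Dict.keys_foldl_modify_key]
    rw [PySem.Set.ofList_eq_foldl]
    rfl
  dsimp only
  have hout : ∀ (l : List (String × List (List (String × String)))),
      l.foldl (fun acc p => acc ++ [pvEmitA p.2]) [] = l.map (fun p => pvEmitA p.2) := fun l => by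
    simpa using PySem.List.foldl_append_singleton_eq_map (fun p => pvEmitA p.2) l []
  rw [PySem.Dict.items_eq_map_keys _ hnod [], hkeys, hout]
  simp only [List.map_map, Function.comp_def]
  exact List.map_congr_left (fun n _ => by rw [pvA_getD])

-- B's whole result, as a map over the same name list
theorem pvB_out (functions : List (List (String × String))) :
    deduplicate_functions_py_alt functions
      = (PySem.Set.ofList (functions.map pvName)).map
          (fun n => pvEmitB (pvPhi (functions.filter (fun f => pvName f == n)))) := by
  unfold deduplicate_functions_py_alt
  rw [pvStepB_eq]
  have hnod : (functions.foldl
      (fun d func => d.insert (pvName func) (pvUpd (d.get? (pvName func)) func))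
      PySem.Dict.empty).keys.Nodup := by
    apply PySem.Dict.nodup_keys_foldl_insert_key
    simp
  have hkeys : (functions.foldl
      (fun d func => d.insert (pvName func) (pvUpd (d.get? (pvName func)) func))
      PySem.Dict.empty).keys = PySem.Set.ofList (functions.map pvName) := by
    rw [PySem.Dict.keys_foldl_insert_key]
    rw [PySem.Set.ofList_eq_foldl]
    rfl
  have hvals : (functions.foldl
      (fun d func => d.insert (pvName func) (pvUpd (d.get? (pvName func)) func))
      PySem.Dict.empty).values
      = ((functions.foldl
          (fun d func => d.insert (pvName func) (pvUpd (d.get? (pvName func)) func))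
          PySem.Dict.empty).items).map Prod.snd := rfl
  dsimp only
  have hout : ∀ (l : List ((List (String × String)) × Option (List String × List String))),
      l.foldl (fun acc g => acc ++ [pvEmitB g]) [] = l.map pvEmitB := fun l => by
    simpa using PySem.List.foldl_append_singleton_eq_map pvEmitB l []
  rw [hvals, PySem.Dict.items_eq_map_keys _ hnod ([], none), hkeys, List.map_map, hout]
  simp only [List.map_map, Function.comp_def]
  apply List.map_congr_left
  intro n hn
  have hmem : n ∈ functions.map pvName := by
    exact (PySem.Set.mem_ofList (y := n) (xs := functions.map pvName)).mp hn
  have hne : functions.filter (fun f => pvName f == n) ≠ [] := by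
    obtain ⟨f, hf, hfn⟩ := List.mem_map.mp hmem
    intro hnil
    have := List.filter_eq_nil_iff.mp hnil f hf
    simp [hfn] at this
  have hget : (functions.foldl
      (fun d func => d.insert (pvName func) (pvUpd (d.get? (pvName func)) func))
      PySem.Dict.empty).get? n = some (pvPhi (functions.filter (fun f => pvName f == n))) := by
    rw [← pvStepB_eq, pvB_get?]
    rw [PySem.Dict.get?_empty, pvFold_upd _ hne]
  rw [PySem.Dict.getD_eq_get?_getD, hget]
  rfl

-- ===== VERDICT (by name: the statement is the Claim_ definition above) =====
theorem deduplicate_functions_py_spec : Claim_equal_deduplicate_functions_py := by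
  intro functions _ _
  unfold Spec_deduplicate_functions_py
  by_cases hf : functions = []
  · subst hf; rfl
  · rw [pvA_out functions hf, pvB_out functions]
    apply List.map_congr_left
    intro n hn
    apply pvEmit_eq
    have hmem : n ∈ functions.map pvName :=
      (PySem.Set.mem_ofList (y := n) (xs := functions.map pvName)).mp hn
    obtain ⟨f, hf', hfn⟩ := List.mem_map.mp hmem
    intro hnil
    have := List.filter_eq_nil_iff.mp hnil f hf'
    simp [hfn] at this
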